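-- pv_equiv track=rewrite | github.com/4b112103/1013 | week06/prob04/main.py | replaceOdd
-- ===== SOURCE A (Python) =====
-- def replaceOdd(istr):
--     pass
--     # Write your code here!
--     # Initialize a counter for tracking the occurrences of 'h'
--     h_count = 0
--     # Initialize an empty result string
--     result = ""
--
--     # Loop through each character in the input string
--     for char in istr:
--         if char == 'h':
--             # Increment the count for each 'h' found
--             h_count += 1
--             # Replace 'h' with 'H' for odd occurrences (1-based index)
--             if h_count % 2 == 1:
--                 char = 'H'
--         result += char
--
--     return result
-- ===== SOURCE B (Python) =====
-- def replaceOdd(istr):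
--     h_positions = [i for i, c in enumerate(istr) if c == 'h']
--     caps = {p for k, p in enumerate(h_positions) if k % 2 == 0}
--     return ''.join('H' if i in caps else c for i, c in enumerate(istr))
-- ===== Notes on version B (the rewrite author's own statement) =====
-- stated objective: alternative
-- what changed: Replaces A's single pass with a running parity counter and string += by an index-table decomposition: first collect the positions of every 'h', keep every other one (even rank) in a set, then rebuild the string in a second pass capitalizing exactly the positions in that set.
import Mathlib
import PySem

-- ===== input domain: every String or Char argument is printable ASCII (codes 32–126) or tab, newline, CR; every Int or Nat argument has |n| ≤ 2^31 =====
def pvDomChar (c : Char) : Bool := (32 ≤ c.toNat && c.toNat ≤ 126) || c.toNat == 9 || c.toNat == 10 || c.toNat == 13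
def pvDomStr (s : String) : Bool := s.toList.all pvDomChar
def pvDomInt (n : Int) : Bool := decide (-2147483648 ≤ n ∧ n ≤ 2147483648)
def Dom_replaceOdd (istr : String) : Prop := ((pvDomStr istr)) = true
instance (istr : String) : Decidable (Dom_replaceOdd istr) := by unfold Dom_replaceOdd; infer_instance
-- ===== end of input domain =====

-- B replaces A's running parity counter with an index-table decomposition (collect 'h' positions,
-- keep every other one in a set, rebuild in a second pass); alternative structure, same cost.

-- ===== PORT A =====
-- A: one pass with a counter h_count and result accumulated by '+=' (here: List Char accumulator).
def replaceOdd (istr : String) : String :=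
  let r := istr.toList.foldl
    (fun (st : Int × List Char) (char : Char) =>
      if char = 'h' then
        let h_count := st.1 + 1
        let char := if PySem.Int.mod h_count 2 == 1 then 'H' else char
        (h_count, st.2 ++ [char])
      else
        (st.1, st.2 ++ [char]))
    (0, [])
  String.ofList r.2

-- ===== PORT B =====
-- B: h_positions = [i for i,c in enumerate(istr) if c=='h']; caps = {p for k,p in enumerate(h_positions) if k%2==0};
--    ''.join('H' if i in caps else c for i,c in enumerate(istr))
def replaceOdd_alt (istr : String) : String :=
  let cs := istr.toList
  let h_positions := ((PySem.List.enumerate cs).filter (fun p => p.2 == 'h')).map Prod.fst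
  let caps : PySem.Set Int :=
    PySem.Set.ofList (((PySem.List.enumerate h_positions).filter
      (fun p => PySem.Int.mod p.1 2 == 0)).map Prod.snd)
  String.ofList ((PySem.List.enumerate cs).map
    (fun p => if PySem.Set.contains caps p.1 then 'H' else p.2))

-- ===== PRECONDITION & SPEC =====
def Spec_replaceOdd (istr : String) (out : String) : Prop := out = replaceOdd_alt istr
instance (istr : String) (out : String) : Decidable (Spec_replaceOdd istr out) := by unfold Spec_replaceOdd; infer_instance

-- ===== CLAIM (what is proved, stated in full; the proofs are below) =====
def Claim_equal_replaceOdd : Prop := ∀ (istr : String), Dom_replaceOdd istr → Spec_replaceOdd istr (replaceOdd istr)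

-- ===== LEMMAS AND PROOFS =====

-- A's loop without the accumulator, counter replaced by its parity flag (b = "count so far is even").
def goA : List Char → Bool → List Char
  | [], _ => []
  | c :: cs, b => if c = 'h' then (if b then 'H' else c) :: goA cs (!b) else c :: goA cs b

-- the list of positions (from offset s) holding 'h'
def hpos : List Char → Int → List Int
  | [], _ => []
  | c :: cs, s => if c = 'h' then s :: hpos cs (s + 1) else hpos cs (s + 1)

-- every other element, starting with the first when b = true
def evens : List Int → Bool → List Int
  | [], _ => []
  | x :: xs, b => if b then x :: evens xs (!b) else evens xs (!b)

theorem mem_hpos_le {cs : List Char} {s x : Int} (h : x ∈ hpos cs s) : s ≤ x := by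
  induction cs generalizing s with
  | nil => simp [hpos] at h
  | cons c cs ih =>
    simp only [hpos] at h
    split at h
    · rcases List.mem_cons.mp h with h | h
      · omega
      · have := ih h; omega
    · have := ih h; omega

theorem mem_evens {xs : List Int} {b : Bool} {x : Int} (h : x ∈ evens xs b) : x ∈ xs := by
  induction xs generalizing b with
  | nil => simp [evens] at h
  | cons y ys ih =>
    simp only [evens] at h
    split at h
    · rcases List.mem_cons.mp h with h | h
      · simp [h]
      · exact List.mem_cons_of_mem _ (ih h)
    · exact List.mem_cons_of_mem _ (ih h)

-- A's foldl threads the accumulator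
theorem foldA (cs : List Char) (m : Nat) (acc : List Char) :
    (cs.foldl
      (fun (st : Int × List Char) (char : Char) =>
        if char = 'h' then
          let h_count := st.1 + 1
          let char := if PySem.Int.mod h_count 2 == 1 then 'H' else char
          (h_count, st.2 ++ [char])
        else
          (st.1, st.2 ++ [char]))
      ((m : Int), acc)).2 = acc ++ goA cs (m % 2 == 0) := by
  induction cs generalizing m acc with
  | nil => simp [goA]
  | cons c cs ih =>
    have hcast : ((m : Int) + 1) = ((m + 1 : Nat) : Int) := by push_cast; ring
    have hmod : PySem.Int.mod ((m : Int) + 1) 2 = (((m + 1) % 2 : Nat) : Int) := by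
      rw [hcast]; exact_mod_cast PySem.Int.mod_natCast (m + 1) 2
    have hflip : ((m + 1) % 2 == 0) = !(m % 2 == 0) := by
      rcases Nat.even_or_odd m with he | ho
      · have h0 := Nat.even_iff.mp he
        have h1 : (m + 1) % 2 = 1 := by omega
        rw [h0, h1]; decide
      · have h1 := Nat.odd_iff.mp ho
        have h0 : (m + 1) % 2 = 0 := by omega
        rw [h0, h1]; decide
    have hb : (PySem.Int.mod ((m : Int) + 1) 2 == 1) = (m % 2 == 0) := by
      rw [hmod]
      rcases Nat.even_or_odd m with he | ho
      · have h0 := Nat.even_iff.mp he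
        have h1 : (m + 1) % 2 = 1 := by omega
        rw [h0, h1]; decide
      · have h1 := Nat.odd_iff.mp ho
        have h0 : (m + 1) % 2 = 0 := by omega
        rw [h0, h1]; decide
    by_cases hc : c = 'h'
    · simp only [List.foldl_cons, hc, if_true]
      rw [hb, hcast, ih (m + 1), hflip]
      simp [goA]
    · simp only [List.foldl_cons, hc, if_false]
      rw [ih m]
      simp [goA, hc]

-- B's h_positions pass computes hpos
theorem hpos_eq (cs : List Char) (s : Int) :
    ((PySem.List.enumerate cs s).filter (fun p => p.2 == 'h')).map Prod.fst = hpos cs s := by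
  induction cs generalizing s with
  | nil => simp [PySem.List.enumerate_nil, hpos]
  | cons c cs ih =>
    rw [PySem.List.enumerate_cons]
    by_cases hc : c = 'h' <;> simp [hpos, hc, ih]

-- B's even-rank pass computes evens
theorem evens_eq (xs : List Int) (m : Nat) :
    ((PySem.List.enumerate xs (m : Int)).filter (fun p => PySem.Int.mod p.1 2 == 0)).map Prod.snd
      = evens xs (m % 2 == 0) := by
  induction xs generalizing m with
  | nil => simp [PySem.List.enumerate_nil, evens]
  | cons x xs ih =>
    rw [PySem.List.enumerate_cons]
    have hmod : PySem.Int.mod ((m : Int)) 2 = ((m % 2 : Nat) : Int) := by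
      exact_mod_cast PySem.Int.mod_natCast m 2
    have hcast : ((m : Int) + 1) = ((m + 1 : Nat) : Int) := by push_cast; ring
    have hflip : ((m + 1) % 2 == 0) = !(m % 2 == 0) := by
      rcases Nat.even_or_odd m with he | ho
      · have h0 := Nat.even_iff.mp he
        have h1 : (m + 1) % 2 = 1 := by omega
        rw [h0, h1]; decide
      · have h1 := Nat.odd_iff.mp ho
        have h0 : (m + 1) % 2 = 0 := by omega
        rw [h0, h1]; decide
    by_cases hb : m % 2 = 0
    · have hcond : (PySem.Int.mod ((m : Int)) 2 == 0) = true := by rw [hmod, hb]; decide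
      simp only [List.filter_cons, hcond, if_true, List.map_cons]
      rw [hcast, ih (m + 1), hflip]
      simp [evens, hb]
    · have h1 : m % 2 = 1 := by omega
      have hcond : (PySem.Int.mod ((m : Int)) 2 == 0) = false := by rw [hmod, h1]; decide
      simp only [List.filter_cons, hcond, Bool.false_eq_true, if_false]
      rw [hcast, ih (m + 1), hflip]
      simp [evens, h1]

-- main structural lemma: B's final pass over the suffix starting at n, tested against
-- the even-rank positions of that suffix, is exactly A's parity-flag loop.
theorem main_lemma (cs : List Char) (n : Nat) (b : Bool) :
    (PySem.List.enumerate cs (n : Int)).map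
      (fun p => if PySem.Set.contains (PySem.Set.ofList (evens (hpos cs (n : Int)) b)) p.1 then 'H' else p.2)
      = goA cs b := by
  induction cs generalizing n b with
  | nil => simp [PySem.List.enumerate_nil, goA]
  | cons c cs ih =>
    rw [PySem.List.enumerate_cons]
    have hcast : ((n : Int) + 1) = ((n + 1 : Nat) : Int) := by push_cast; ring
    have htail_ne : ∀ p ∈ PySem.List.enumerate cs ((n : Int) + 1), p.1 ≠ (n : Int) := by
      intro p hp
      rcases (PySem.List.mem_enumerate_iff _ _ _).mp hp with ⟨k, hk, rfl⟩
      intro h; omega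
    -- head-membership facts
    by_cases hc : c = 'h'
    · simp only [hpos, hc, if_true]
      by_cases hb : b
      · subst hb
        simp only [evens, if_true]
        -- E = n :: evens (hpos cs (n+1)) false; head n is in E
        have hmemn : (n : Int) ∈ ((n : Int) :: evens (hpos cs ((n : Int) + 1)) (!true)) := by simp
        have hconn : PySem.Set.contains (PySem.Set.ofList ((n : Int) :: evens (hpos cs ((n : Int) + 1)) (!true))) (n : Int) = true :=
          (PySem.Set.contains_iff _ _).mpr ((PySem.Set.mem_ofList _ _).mpr hmemn)
        simp only [List.map_cons, hconn]
        have htail :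
            (PySem.List.enumerate cs ((n : Int) + 1)).map
              (fun p => if PySem.Set.contains (PySem.Set.ofList ((n : Int) :: evens (hpos cs ((n : Int) + 1)) (!true))) p.1 then 'H' else p.2)
            = (PySem.List.enumerate cs ((n : Int) + 1)).map
              (fun p => if PySem.Set.contains (PySem.Set.ofList (evens (hpos cs ((n : Int) + 1)) (!true))) p.1 then 'H' else p.2) := by
          apply List.map_congr_left
          intro p hp
          have hne := htail_ne p hp
          have : (PySem.Set.contains (PySem.Set.ofList ((n : Int) :: evens (hpos cs ((n : Int) + 1)) (!true))) p.1)
               = (PySem.Set.contains (PySem.Set.ofList (evens (hpos cs ((n : Int) + 1)) (!true))) p.1) := by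
            by_cases hm : p.1 ∈ evens (hpos cs ((n : Int) + 1)) (!true)
            · have c1 := (PySem.Set.contains_iff _ _).mpr ((PySem.Set.mem_ofList _ _).mpr (List.mem_cons_of_mem ((n : Int)) hm))
              have c2 := (PySem.Set.contains_iff _ _).mpr ((PySem.Set.mem_ofList _ _).mpr hm)
              rw [c1, c2]
            · have h1 : PySem.Set.contains (PySem.Set.ofList ((n : Int) :: evens (hpos cs ((n : Int) + 1)) (!true))) p.1 = false := by
                rw [Bool.eq_false_iff]; intro hcon
                rcases List.mem_cons.mp ((PySem.Set.mem_ofList _ _).mp ((PySem.Set.contains_iff _ _).mp hcon)) with h | h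
                · exact hne h
                · exact hm h
              have h2 : PySem.Set.contains (PySem.Set.ofList (evens (hpos cs ((n : Int) + 1)) (!true))) p.1 = false := by
                rw [Bool.eq_false_iff]; intro hcon
                exact hm ((PySem.Set.mem_ofList _ _).mp ((PySem.Set.contains_iff _ _).mp hcon))
              rw [h1, h2]
          rw [this]
        rw [htail, hcast, ih (n + 1) (!true)]
        simp [goA]
      · have hb' : b = false := by simpa using hb
        subst hb'
        simp only [evens, Bool.false_eq_true, if_false]
        -- head n is NOT in E = evens (hpos cs (n+1)) true
        have hnotn : PySem.Set.contains (PySem.Set.ofList (evens (hpos cs ((n : Int) + 1)) (!false))) (n : Int) = false := by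
          rw [Bool.eq_false_iff]; intro hcon
          have hm := (PySem.Set.mem_ofList _ _).mp ((PySem.Set.contains_iff _ _).mp hcon)
          have := mem_hpos_le (mem_evens hm)
          omega
        simp only [List.map_cons, hnotn, Bool.false_eq_true, if_false]
        rw [hcast, ih (n + 1) (!false)]
        simp [goA]
    · simp only [hpos, hc, if_false]
      have hnotn : PySem.Set.contains (PySem.Set.ofList (evens (hpos cs ((n : Int) + 1)) b)) (n : Int) = false := by
        rw [Bool.eq_false_iff]; intro hcon
        have hm := (PySem.Set.mem_ofList _ _).mp ((PySem.Set.contains_iff _ _).mp hcon)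
        have := mem_hpos_le (mem_evens hm)
        omega
      simp only [List.map_cons, hnotn, Bool.false_eq_true, if_false]
      rw [hcast, ih (n + 1) b]
      simp [goA, hc]

-- ===== VERDICT (by name: the statement is the Claim_ definition above) =====
theorem replaceOdd_spec : Claim_equal_replaceOdd := by
  intro istr _
  have hA := foldA istr.toList 0 []
  have hB := main_lemma istr.toList 0 true
  have he := evens_eq (hpos istr.toList 0) 0
  simp only [Nat.cast_zero, Nat.zero_mod, List.nil_append] at hA hB he
  rw [show ((0 : Nat) == 0) = true from rfl] at hA he
  show replaceOdd istr = replaceOdd_alt istr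
  unfold replaceOdd replaceOdd_alt
  show String.ofList (istr.toList.foldl
      (fun (st : Int × List Char) (char : Char) =>
        if char = 'h' then
          (st.1 + 1, st.2 ++ [if PySem.Int.mod (st.1 + 1) 2 == 1 then 'H' else char])
        else (st.1, st.2 ++ [char])) ((0 : Int), ([] : List Char))).2
    = String.ofList ((PySem.List.enumerate istr.toList 0).map
        (fun p => if PySem.Set.contains (PySem.Set.ofList (((PySem.List.enumerate
            (((PySem.List.enumerate istr.toList 0).filter (fun p => p.2 == 'h')).map Prod.fst) 0).filter
            (fun p => PySem.Int.mod p.1 2 == 0)).map Prod.snd)) p.1 then 'H' else p.2))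
  rw [hpos_eq istr.toList 0, he, hA, ← hB]
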